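-- pv_equiv track=rewrite | github.com/miliar/Code_Jam_Webscraper | solutions_python/Problem_178/1203.py | non_alternate
-- ===== SOURCE A (Python) =====
-- def non_alternate(stack):
-- 	if len(stack) == 0:
-- 		return True
--
-- 	seen = stack[0]
-- 	non_alternate = True
-- 	sign_changed = False
-- 	for e in stack[1:]:
-- 		if e != seen and sign_changed == False:
-- 			sign_changed = True
-- 			seen = e
-- 		elif e != seen and sign_changed == True:
-- 			non_alternate = False
-- 			break
--
-- 	return non_alternate
-- ===== SOURCE B (Python) =====
-- from itertools import groupby
--
-- def non_alternate(stack):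
--     # True iff the list collapses into at most two maximal runs of equal values
--     return sum(1 for _ in groupby(stack)) <= 2
-- ===== Notes on version B (the rewrite author's own statement) =====
-- stated objective: idiomatic
-- what changed: Replaces the seen-value/sign_changed flag loop with counting maximal runs of equal values via itertools.groupby and checking the count is at most 2.
import Mathlib
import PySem

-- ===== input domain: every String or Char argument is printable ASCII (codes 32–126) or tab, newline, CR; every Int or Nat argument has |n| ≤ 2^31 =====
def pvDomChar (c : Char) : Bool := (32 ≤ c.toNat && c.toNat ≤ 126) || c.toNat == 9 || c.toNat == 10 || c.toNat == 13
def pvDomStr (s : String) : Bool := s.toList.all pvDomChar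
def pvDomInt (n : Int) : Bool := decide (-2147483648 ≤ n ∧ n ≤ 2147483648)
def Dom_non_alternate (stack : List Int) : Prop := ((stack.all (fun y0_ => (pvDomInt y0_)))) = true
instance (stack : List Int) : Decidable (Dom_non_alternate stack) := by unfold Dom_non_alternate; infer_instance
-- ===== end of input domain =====

-- B counts maximal runs of equal values (itertools.groupby) and checks ≤ 2; A keeps a seen/sign_changed flag loop.

-- ===== PORT A =====
-- the loop over stack[1:] with state (seen, sign_changed); break on second change
def nonAltLoop (seen : Int) (signChanged : Bool) : List Int → Bool
  | [] => true
  | e :: rest =>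
    if e ≠ seen ∧ signChanged = false then nonAltLoop e true rest
    else if e ≠ seen ∧ signChanged = true then false
    else nonAltLoop seen signChanged rest

def non_alternate (stack : List Int) : Bool :=
  match stack with
  | [] => true
  | x :: xs => nonAltLoop x false xs

-- ===== PORT B =====
-- number of groupby groups whose first element is `prev`-started: counts runs in prev :: xs
def runCountAux (prev : Int) : List Int → Nat
  | [] => 1
  | x :: xs => if x = prev then runCountAux prev xs else 1 + runCountAux x xs

def non_alternate_alt (stack : List Int) : Bool :=
  match stack with
  | [] => true
  | x :: xs => decide (runCountAux x xs ≤ 2)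

-- ===== PRECONDITION & SPEC =====
def Spec_non_alternate (stack : List Int) (out : Bool) : Prop := out = non_alternate_alt stack
instance (stack : List Int) (out : Bool) : Decidable (Spec_non_alternate stack out) := by unfold Spec_non_alternate; infer_instance

-- ===== CLAIM (what is proved, stated in full; the proofs are below) =====
def Claim_equal_non_alternate : Prop := ∀ (stack : List Int), Dom_non_alternate stack → Spec_non_alternate stack (non_alternate stack)

-- ===== LEMMAS AND PROOFS =====
theorem runCountAux_pos (prev : Int) (xs : List Int) : 1 ≤ runCountAux prev xs := by
  induction xs generalizing prev with
  | nil => simp [runCountAux]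
  | cons x xs ih =>
    simp only [runCountAux]
    split
    · exact ih prev
    · omega

theorem nonAltLoop_eq (xs : List Int) : ∀ (seen : Int) (sc : Bool),
    nonAltLoop seen sc xs = decide (runCountAux seen xs ≤ (if sc then 1 else 2)) := by
  induction xs with
  | nil => intro seen sc; cases sc <;> simp [nonAltLoop, runCountAux]
  | cons e rest ih =>
    intro seen sc
    by_cases he : e = seen
    · subst he
      cases sc <;> simp [nonAltLoop, runCountAux, ih]
    · cases sc with
      | false =>
        simp only [nonAltLoop]
        rw [if_pos (by simp [he] : (e ≠ seen ∧ True))]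
        rw [ih e true]
        simp [runCountAux, he]
        omega
      | true =>
        have h1 := runCountAux_pos e rest
        simp only [nonAltLoop, runCountAux]
        rw [if_neg (by simp), if_pos (by simp [he])]
        simp [he]
        omega

-- ===== VERDICT (by name: the statement is the Claim_ definition above) =====
theorem non_alternate_spec : Claim_equal_non_alternate := by
  intro stack _
  unfold Spec_non_alternate non_alternate non_alternate_alt
  cases stack with
  | nil => rfl
  | cons x xs => simpa using nonAltLoop_eq xs x false
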